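-- pv_equiv track=rewrite | github.com/mjoshicodes/cpsc474-final-project | model/chopsticks/chopsticks.py | get_split_actions
-- ===== SOURCE A (Python) =====
-- from itertools import combinations, product, combinations_with_replacement
--
-- def get_split_actions(left_hand, right_hand):
--     if left_hand == 0 or right_hand == 0:
--         return []
--     hand_sum = left_hand + right_hand
--     possible_hand_values = [hand for hand in list(range(0, hand_sum)) if hand < 5]
--     combos = list(combinations_with_replacement(possible_hand_values, 2))
--     split_combinations = [combo for combo in combos if sum(combo) == hand_sum and (combo != (left_hand, right_hand) and combo != (right_hand, left_hand))]
--     return split_combinations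
-- ===== SOURCE B (Python) =====
-- def get_split_actions(left_hand, right_hand):
--     if left_hand == 0 or right_hand == 0:
--         return []
--     hand_sum = left_hand + right_hand
--     return [(a, hand_sum - a) for a in range(0, min(hand_sum, 5))
--             if 0 < a <= hand_sum - a < 5
--             and (a, hand_sum - a) != (left_hand, right_hand)
--             and (a, hand_sum - a) != (right_hand, left_hand)]
-- ===== Notes on version B (the rewrite author's own statement) =====
-- stated objective: simpler
-- what changed: Drops itertools generate-and-filter over all pairs of hand values: B computes each candidate split directly as (a, hand_sum-a) for a in range(min(hand_sum,5)), which also avoids materialising the O(hand_sum) range list.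
import Mathlib
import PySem

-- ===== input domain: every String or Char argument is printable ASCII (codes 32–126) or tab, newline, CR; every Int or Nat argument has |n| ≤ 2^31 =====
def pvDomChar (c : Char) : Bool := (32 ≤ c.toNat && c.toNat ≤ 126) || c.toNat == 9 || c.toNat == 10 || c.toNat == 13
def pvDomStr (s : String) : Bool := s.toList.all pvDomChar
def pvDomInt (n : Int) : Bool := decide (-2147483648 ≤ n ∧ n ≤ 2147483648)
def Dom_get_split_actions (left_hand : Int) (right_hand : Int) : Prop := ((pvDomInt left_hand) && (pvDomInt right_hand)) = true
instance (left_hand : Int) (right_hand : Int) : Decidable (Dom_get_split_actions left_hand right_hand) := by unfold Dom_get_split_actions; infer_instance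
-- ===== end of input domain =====

-- B drops itertools and builds each split directly as (a, hand_sum - a) over a 5-element range (simpler, and O(1) instead of O(hand_sum)).

-- ===== PORT A =====
-- combinations_with_replacement(xs, 2): pairs (xs[i], xs[j]) with i ≤ j, in that order
def cwr2 : List Int → List (Int × Int)
  | [] => []
  | x :: rest => (x :: rest).map (fun y => (x, y)) ++ cwr2 rest

def get_split_actions (left_hand : Int) (right_hand : Int) : List (Int × Int) :=
  if left_hand = 0 ∨ right_hand = 0 then []
  else
    let hand_sum := left_hand + right_hand
    let possible_hand_values := (PySem.List.pyRange 0 hand_sum 1).filter (fun hand => hand < 5)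
    let combos := cwr2 possible_hand_values
    combos.filter (fun combo =>
      combo.1 + combo.2 == hand_sum &&
      (combo != (left_hand, right_hand) && combo != (right_hand, left_hand)))

-- ===== PORT B =====
def get_split_actions_alt (left_hand : Int) (right_hand : Int) : List (Int × Int) :=
  if left_hand = 0 ∨ right_hand = 0 then []
  else
    let hand_sum := left_hand + right_hand
    ((PySem.List.pyRange 0 (min hand_sum 5) 1).filter (fun a =>
        0 < a && a ≤ hand_sum - a && hand_sum - a < 5 &&
        ((a, hand_sum - a) != (left_hand, right_hand)) &&
        ((a, hand_sum - a) != (right_hand, left_hand)))).map (fun a => (a, hand_sum - a))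

-- ===== PRECONDITION & SPEC =====
def Spec_get_split_actions (left_hand : Int) (right_hand : Int) (out : List (Int × Int)) : Prop := out = get_split_actions_alt left_hand right_hand
instance (left_hand : Int) (right_hand : Int) (out : List (Int × Int)) : Decidable (Spec_get_split_actions left_hand right_hand out) := by unfold Spec_get_split_actions; infer_instance

-- ===== CLAIM (what is proved, stated in full; the proofs are below) =====
def Claim_equal_get_split_actions : Prop := ∀ (left_hand : Int) (right_hand : Int), Dom_get_split_actions left_hand right_hand → Spec_get_split_actions left_hand right_hand (get_split_actions left_hand right_hand)

-- ===== LEMMAS AND PROOFS =====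

theorem core (S L R : Int) :
  (cwr2 ((PySem.List.pyRange 0 S 1).filter (fun hand => hand < 5))).filter
      (fun combo => combo.1 + combo.2 == S && (combo != (L,R) && combo != (R,L)))
  = ((PySem.List.pyRange 0 (min S 5) 1).filter (fun a =>
        0 < a && a ≤ S - a && S - a < 5 && ((a, S-a) != (L,R)) && ((a, S-a) != (R,L)))).map
      (fun a => (a, S - a)) := by
  rcases (by omega : S ≤ 0 ∨ 0 < S) with hle | hpos
  · rw [PySem.List.pyRange_one_eq_nil hle, PySem.List.pyRange_one_eq_nil (by omega)]
    simp [cwr2]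
  · rcases (by omega : S ≤ 8 ∨ 8 < S) with h8 | h9
    · interval_cases S <;> simp [PySem.List.pyRange_one, List.range_succ, cwr2, List.filter]
      all_goals (repeat' split)
      all_goals simp_all
    · have hmin : min S 5 = 5 := by omega
      rw [PySem.List.pyRange_one_append 0 5 S (by omega) (by omega), hmin]
      rw [List.filter_append]
      have h1 : (PySem.List.pyRange 0 5 1).filter (fun hand => decide (hand < 5)) = [0,1,2,3,4] := by decide
      have h2 : (PySem.List.pyRange 5 S 1).filter (fun hand => decide (hand < 5)) = [] := by
        rw [List.filter_eq_nil_iff]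
        intro a ha
        rw [PySem.List.mem_pyRange_one] at ha
        simp
        omega
      rw [h1, h2]
      have hA : (cwr2 ([0,1,2,3,4] ++ [])).filter (fun combo => combo.1 + combo.2 == S && (combo != (L,R) && combo != (R,L))) = [] := by
        rw [List.filter_eq_nil_iff]
        intro p hp
        fin_cases hp <;> simp <;> omega
      have hB : (PySem.List.pyRange 0 5 1).filter (fun a => 0 < a && a ≤ S - a && S - a < 5 && ((a, S-a) != (L,R)) && ((a, S-a) != (R,L))) = [] := by
        rw [List.filter_eq_nil_iff]
        intro a ha
        rw [PySem.List.mem_pyRange_one] at ha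
        simp
        omega
      rw [hA, hB]
      rfl

theorem main_lemma (L R : Int) : get_split_actions L R = get_split_actions_alt L R := by
  unfold get_split_actions get_split_actions_alt
  by_cases h0 : L = 0 ∨ R = 0
  · simp [h0]
  · simp only [if_neg h0]
    exact core (L+R) L R

-- ===== VERDICT (by name: the statement is the Claim_ definition above) =====
theorem get_split_actions_spec : Claim_equal_get_split_actions := by
  intro L R _
  unfold Spec_get_split_actions
  exact main_lemma L R
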